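-- pv_equiv track=rewrite | github.com/jansel/pytorch-jit-paritybench | generated/test_guotong1988_NL2SQL_RULE.py | gen_i_vg_from_pnt_idxs
-- ===== SOURCE A (Python) =====
-- def find_where_pnt_belong(pnt, vg):
--     idx_sub = -1
--     for i, st_ed in enumerate(vg):
--         st, ed = st_ed
--         if pnt < ed and pnt >= st:
--             idx_sub = i
--     return idx_sub
--
-- def gen_pnt_i_from_pnt(pnt, i_sql_vocab1, i_nlu1, i_hds1):
--     vg_list = [i_sql_vocab1, [i_nlu1], i_hds1]
--     i_vg = -1
--     i_vg_sub = -1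
--     for i, vg in enumerate(vg_list):
--         idx_sub = find_where_pnt_belong(pnt, vg)
--         if idx_sub > -1:
--             i_vg = i
--             i_vg_sub = idx_sub
--             break
--     return i_vg, i_vg_sub
--
-- def gen_i_vg_from_pnt_idxs(pnt_idxs, i_sql_vocab, i_nlu, i_hds):
--     i_vg_list = []
--     i_vg_sub_list = []
--     for b, pnt_idxs1 in enumerate(pnt_idxs):
--         sql_q1_list = []
--         i_vg_list1 = []
--         i_vg_sub_list1 = []
--         for t, pnt in enumerate(pnt_idxs1):
--             i_vg, i_vg_sub = gen_pnt_i_from_pnt(pnt, i_sql_vocab[b], i_nlu[b], i_hds[b])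
--             i_vg_list1.append(i_vg)
--             i_vg_sub_list1.append(i_vg_sub)
--         i_vg_list.append(i_vg_list1)
--         i_vg_sub_list.append(i_vg_sub_list1)
--     return i_vg_list, i_vg_sub_list
-- ===== SOURCE B (Python) =====
-- def gen_i_vg_from_pnt_idxs(pnt_idxs, i_sql_vocab, i_nlu, i_hds):
--     i_vg_list, i_vg_sub_list = [], []
--     for b, pts in enumerate(pnt_idxs):
--         groups = [i_sql_vocab[b], [i_nlu[b]], i_hds[b]]
--         res = [(-1, -1)] * len(pts)
--         for gi, vg in reversed(list(enumerate(groups))):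
--             for ii, (st, ed) in enumerate(vg):
--                 res = [(gi, ii) if st <= p < ed else r for p, r in zip(pts, res)]
--         i_vg_list.append([v for v, _ in res])
--         i_vg_sub_list.append([s for _, s in res])
--     return i_vg_list, i_vg_sub_list
-- ===== Notes on version B (the rewrite author's own statement) =====
-- stated objective: alternative
-- what changed: Replaces the per-point gather (for each pointer, scan all groups and intervals, break on first matching group) with an interval-major scatter: per batch it initializes a (-1,-1) result vector and sweeps each interval once over all points, iterating groups in reverse and intervals forward so lower groups / later intervals overwrite, which reproduces first-group / last-interval precedence.
-- outside the precondition, e.g. on gen_i_vg_from_pnt_idxs([[]], [], [], []): A returns ([[]], [[]]), B raises IndexError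
import Mathlib
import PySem

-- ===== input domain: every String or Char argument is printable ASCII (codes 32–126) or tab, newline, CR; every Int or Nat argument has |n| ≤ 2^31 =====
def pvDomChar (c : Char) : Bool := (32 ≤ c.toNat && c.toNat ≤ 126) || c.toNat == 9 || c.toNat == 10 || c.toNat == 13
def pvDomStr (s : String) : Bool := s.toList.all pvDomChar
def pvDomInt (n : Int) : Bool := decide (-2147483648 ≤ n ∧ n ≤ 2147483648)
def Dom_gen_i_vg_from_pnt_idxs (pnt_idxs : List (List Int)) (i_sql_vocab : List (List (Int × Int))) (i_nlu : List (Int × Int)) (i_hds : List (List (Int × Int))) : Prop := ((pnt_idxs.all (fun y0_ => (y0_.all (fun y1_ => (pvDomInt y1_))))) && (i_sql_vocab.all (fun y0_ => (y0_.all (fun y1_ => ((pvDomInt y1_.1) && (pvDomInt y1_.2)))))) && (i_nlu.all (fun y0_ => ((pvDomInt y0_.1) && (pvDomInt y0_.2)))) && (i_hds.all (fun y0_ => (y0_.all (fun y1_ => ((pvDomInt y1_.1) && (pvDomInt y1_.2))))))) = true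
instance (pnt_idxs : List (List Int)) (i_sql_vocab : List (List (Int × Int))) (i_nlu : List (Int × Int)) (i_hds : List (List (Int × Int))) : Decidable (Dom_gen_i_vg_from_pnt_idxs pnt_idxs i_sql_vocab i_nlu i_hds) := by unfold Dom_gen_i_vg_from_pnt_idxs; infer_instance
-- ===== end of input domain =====

-- B replaces A's per-point gather over groups/intervals by an interval-major scatter
-- (reverse group order, forward interval order) into a preallocated result vector;
-- same asymptotic cost, different traversal (objective: alternative).

-- ===== PORT A =====
-- the 'for i, st_ed in enumerate(vg)' loop of find_where_pnt_belong, state (i, idx_sub)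
def findLoop (pnt : Int) (i : Int) (idx : Int) : List (Int × Int) → Int
  | [] => idx
  | (st, ed) :: rest => findLoop pnt (i + 1) (if pnt < ed ∧ pnt ≥ st then i else idx) rest

def find_where_pnt_belong (pnt : Int) (vg : List (Int × Int)) : Int :=
  findLoop pnt 0 (-1) vg

-- the 'for i, vg in enumerate(vg_list)' loop of gen_pnt_i_from_pnt, with its break
def genLoop (pnt : Int) (i : Int) : List (List (Int × Int)) → Int × Int
  | [] => (-1, -1)
  | vg :: rest =>
      let idx_sub := find_where_pnt_belong pnt vg
      if idx_sub > -1 then (i, idx_sub) else genLoop pnt (i + 1) rest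

def gen_pnt_i_from_pnt (pnt : Int) (i_sql_vocab1 : List (Int × Int)) (i_nlu1 : Int × Int) (i_hds1 : List (Int × Int)) : Int × Int :=
  genLoop pnt 0 [i_sql_vocab1, [i_nlu1], i_hds1]

-- the inner 'for t, pnt in enumerate(pnt_idxs1)' loop; the indexings i_sql_vocab[b] etc.
-- happen at each call site, as in Python (pyGet?; Pre_ keeps the index in range)
def aPoints (i_sql_vocab : List (List (Int × Int))) (i_nlu : List (Int × Int)) (i_hds : List (List (Int × Int))) (b : Int) : List Int → List Int × List Int
  | [] => ([], [])
  | pnt :: rest =>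
      let r := gen_pnt_i_from_pnt pnt ((PySem.List.pyGet? i_sql_vocab b).getD [])
                ((PySem.List.pyGet? i_nlu b).getD (0, 0)) ((PySem.List.pyGet? i_hds b).getD [])
      let t := aPoints i_sql_vocab i_nlu i_hds b rest
      (r.1 :: t.1, r.2 :: t.2)

-- the outer 'for b, pnt_idxs1 in enumerate(pnt_idxs)' loop
def aBatches (i_sql_vocab : List (List (Int × Int))) (i_nlu : List (Int × Int)) (i_hds : List (List (Int × Int))) (b : Int) : List (List Int) → List (List Int) × List (List Int)
  | [] => ([], [])
  | pts :: rest =>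
      let r := aPoints i_sql_vocab i_nlu i_hds b pts
      let t := aBatches i_sql_vocab i_nlu i_hds (b + 1) rest
      (r.1 :: t.1, r.2 :: t.2)

def gen_i_vg_from_pnt_idxs (pnt_idxs : List (List Int)) (i_sql_vocab : List (List (Int × Int))) (i_nlu : List (Int × Int)) (i_hds : List (List (Int × Int))) : List (List Int) × List (List Int) :=
  aBatches i_sql_vocab i_nlu i_hds 0 pnt_idxs

-- ===== PORT B =====
-- one interval (st, ed) of group gi, sub-index ii, swept over all points at once
def updRes (gi ii st ed : Int) (pts : List Int) (res : List (Int × Int)) : List (Int × Int) :=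
  (pts.zip res).map (fun pr => if st ≤ pr.1 ∧ pr.1 < ed then (gi, ii) else pr.2)

-- the 'for ii, (st, ed) in enumerate(vg)' loop
def groupPass (gi ii : Int) (pts : List Int) (res : List (Int × Int)) : List (Int × Int) → List (Int × Int)
  | [] => res
  | (st, ed) :: rest => groupPass gi (ii + 1) pts (updRes gi ii st ed pts res) rest

def altBatches (i_sql_vocab : List (List (Int × Int))) (i_nlu : List (Int × Int)) (i_hds : List (List (Int × Int))) (b : Int) : List (List Int) → List (List Int) × List (List Int)
  | [] => ([], [])
  | pts :: rest =>
      let sv := (PySem.List.pyGet? i_sql_vocab b).getD []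
      let nlu := (PySem.List.pyGet? i_nlu b).getD (0, 0)
      let hds := (PySem.List.pyGet? i_hds b).getD []
      let res0 := List.replicate pts.length ((-1 : Int), (-1 : Int))
      -- 'for gi, vg in reversed(list(enumerate(groups)))': groups is the literal 3-list,
      -- so the reversed enumeration is the literal sequence (2, hds), (1, [nlu]), (0, sv)
      let res1 := groupPass 2 0 pts res0 hds
      let res2 := groupPass 1 0 pts res1 [nlu]
      let res := groupPass 0 0 pts res2 sv
      let t := altBatches i_sql_vocab i_nlu i_hds (b + 1) rest
      ((res.map Prod.fst) :: t.1, (res.map Prod.snd) :: t.2)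

def gen_i_vg_from_pnt_idxs_alt (pnt_idxs : List (List Int)) (i_sql_vocab : List (List (Int × Int))) (i_nlu : List (Int × Int)) (i_hds : List (List (Int × Int))) : List (List Int) × List (List Int) :=
  altBatches i_sql_vocab i_nlu i_hds 0 pnt_idxs

-- ===== PRECONDITION & SPEC =====
-- Pre_ excludes inputs where the three index lists are shorter than pnt_idxs: there
-- Python A raises IndexError on any nonempty row, and only returns (rows of []) when
-- every excess row is empty, because it indexes lazily per point — B indexes once per
-- batch and raises IndexError there.
def Pre_gen_i_vg_from_pnt_idxs (pnt_idxs : List (List Int)) (i_sql_vocab : List (List (Int × Int))) (i_nlu : List (Int × Int)) (i_hds : List (List (Int × Int))) : Prop :=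
  pnt_idxs.length ≤ i_sql_vocab.length ∧ pnt_idxs.length ≤ i_nlu.length ∧ pnt_idxs.length ≤ i_hds.length
instance (pnt_idxs : List (List Int)) (i_sql_vocab : List (List (Int × Int))) (i_nlu : List (Int × Int)) (i_hds : List (List (Int × Int))) : Decidable (Pre_gen_i_vg_from_pnt_idxs pnt_idxs i_sql_vocab i_nlu i_hds) := by unfold Pre_gen_i_vg_from_pnt_idxs; infer_instance

def pvWitness_gen_i_vg_from_pnt_idxs : List (List Int) × (List (List (Int × Int))) × (List (Int × Int)) × (List (List (Int × Int))) :=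
  ([[0, 2]], [[(0, 2)]], [(2, 4)], [[(4, 6)]])

def Spec_gen_i_vg_from_pnt_idxs (pnt_idxs : List (List Int)) (i_sql_vocab : List (List (Int × Int))) (i_nlu : List (Int × Int)) (i_hds : List (List (Int × Int))) (out : List (List Int) × List (List Int)) : Prop := out = gen_i_vg_from_pnt_idxs_alt pnt_idxs i_sql_vocab i_nlu i_hds
instance (pnt_idxs : List (List Int)) (i_sql_vocab : List (List (Int × Int))) (i_nlu : List (Int × Int)) (i_hds : List (List (Int × Int))) (out : List (List Int) × List (List Int)) : Decidable (Spec_gen_i_vg_from_pnt_idxs pnt_idxs i_sql_vocab i_nlu i_hds out) := by unfold Spec_gen_i_vg_from_pnt_idxs; infer_instance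

-- ===== CLAIM (what is proved, stated in full; the proofs are below) =====
def Claim_equal_gen_i_vg_from_pnt_idxs : Prop := ∀ (pnt_idxs : List (List Int)) (i_sql_vocab : List (List (Int × Int))) (i_nlu : List (Int × Int)) (i_hds : List (List (Int × Int))), Dom_gen_i_vg_from_pnt_idxs pnt_idxs i_sql_vocab i_nlu i_hds → Pre_gen_i_vg_from_pnt_idxs pnt_idxs i_sql_vocab i_nlu i_hds → Spec_gen_i_vg_from_pnt_idxs pnt_idxs i_sql_vocab i_nlu i_hds (gen_i_vg_from_pnt_idxs pnt_idxs i_sql_vocab i_nlu i_hds)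

-- ===== LEMMAS AND PROOFS =====

-- scalar shadow of one group pass at a single point
def sg (gi ii : Int) (p : Int) (r : Int × Int) : List (Int × Int) → Int × Int
  | [] => r
  | (st, ed) :: rest => sg gi (ii + 1) p (if st ≤ p ∧ p < ed then (gi, ii) else r) rest

theorem updRes_map (gi ii st ed : Int) (pts : List Int) (f : Int → Int × Int) :
    updRes gi ii st ed pts (pts.map f)
      = pts.map (fun p => if st ≤ p ∧ p < ed then (gi, ii) else f p) := by
  induction pts with
  | nil => rfl
  | cons p rest ih => simp [updRes, List.zip] at ih ⊢; exact ih

theorem groupPass_map (vg : List (Int × Int)) (gi ii : Int) (pts : List Int) (f : Int → Int × Int) :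
    groupPass gi ii pts (pts.map f) vg = pts.map (fun p => sg gi ii p (f p) vg) := by
  induction vg generalizing ii f with
  | nil => rfl
  | cons se rest ih =>
      obtain ⟨st, ed⟩ := se
      simp only [groupPass, sg, updRes_map]
      exact ih (ii + 1) _

theorem sg_findLoop (vg : List (Int × Int)) (gi p : Int) (ii idx : Int) (r0 : Int × Int)
    (hii : 0 ≤ ii) (hidx : idx = -1 ∨ 0 ≤ idx) :
    sg gi ii p (if idx > -1 then (gi, idx) else r0) vg
      = (if findLoop p ii idx vg > -1 then (gi, findLoop p ii idx vg) else r0) := by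
  induction vg generalizing ii idx with
  | nil => rfl
  | cons se rest ih =>
      obtain ⟨st, ed⟩ := se
      simp only [sg, findLoop]
      by_cases h : p < ed ∧ p ≥ st
      · have h' : st ≤ p ∧ p < ed := ⟨h.2, h.1⟩
        rw [if_pos h', if_pos h]
        have : (gi, ii) = (if ii > -1 then (gi, ii) else r0) := by rw [if_pos (by omega)]
        rw [this]
        apply ih <;> omega
      · have h' : ¬ (st ≤ p ∧ p < ed) := fun hc => h ⟨hc.2, hc.1⟩
        rw [if_neg h', if_neg h]
        apply ih
        · omega
        · exact hidx

theorem sg_find (vg : List (Int × Int)) (gi p : Int) (r0 : Int × Int) :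
    sg gi 0 p r0 vg
      = (if find_where_pnt_belong p vg > -1 then (gi, find_where_pnt_belong p vg) else r0) := by
  have := sg_findLoop vg gi p 0 (-1) r0 (by omega) (Or.inl rfl)
  simpa [find_where_pnt_belong] using this

theorem sg_genPnt (p : Int) (sv : List (Int × Int)) (nlu : Int × Int) (hds : List (Int × Int)) :
    sg 0 0 p (sg 1 0 p (sg 2 0 p (-1, -1) hds) [nlu]) sv
      = gen_pnt_i_from_pnt p sv nlu hds := by
  rw [sg_find hds 2 p, sg_find [nlu] 1 p, sg_find sv 0 p]
  simp only [gen_pnt_i_from_pnt, genLoop, find_where_pnt_belong]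
  split_ifs <;> simp_all

theorem aPoints_map (sv : List (List (Int × Int))) (nl : List (Int × Int)) (hd : List (List (Int × Int))) (b : Int) (pts : List Int) :
    aPoints sv nl hd b pts
      = (pts.map (fun p => (gen_pnt_i_from_pnt p ((PySem.List.pyGet? sv b).getD [])
            ((PySem.List.pyGet? nl b).getD (0, 0)) ((PySem.List.pyGet? hd b).getD [])).1),
         pts.map (fun p => (gen_pnt_i_from_pnt p ((PySem.List.pyGet? sv b).getD [])
            ((PySem.List.pyGet? nl b).getD (0, 0)) ((PySem.List.pyGet? hd b).getD [])).2)) := by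
  induction pts with
  | nil => rfl
  | cons p rest ih => simp [aPoints, ih]

theorem batch_eq (sv : List (List (Int × Int))) (nl : List (Int × Int)) (hd : List (List (Int × Int))) (b : Int) (pnt_idxs : List (List Int)) :
    aBatches sv nl hd b pnt_idxs = altBatches sv nl hd b pnt_idxs := by
  induction pnt_idxs generalizing b with
  | nil => rfl
  | cons pts rest ih =>
      simp only [aBatches, altBatches, ih]
      have hrep : List.replicate pts.length ((-1 : Int), (-1 : Int))
          = pts.map (fun _ => ((-1 : Int), (-1 : Int))) := by
        simp [List.map_const']
      rw [hrep, groupPass_map, groupPass_map, groupPass_map, aPoints_map]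
      simp only [List.map_map, Prod.mk.injEq, List.cons.injEq]
      refine ⟨⟨?_, trivial⟩, ?_, trivial⟩ <;>
        exact List.map_congr_left (fun p _ => by simp [Function.comp, sg_genPnt])

-- ===== VERDICT (by name: the statement is the Claim_ definition above) =====
theorem gen_i_vg_from_pnt_idxs_spec : Claim_equal_gen_i_vg_from_pnt_idxs := by
  intro pnt_idxs sv nl hd _ _
  unfold Spec_gen_i_vg_from_pnt_idxs gen_i_vg_from_pnt_idxs gen_i_vg_from_pnt_idxs_alt
  exact batch_eq sv nl hd 0 pnt_idxs
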